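-- pv_equiv track=rewrite | github.com/sunyiyou/SAT | utils/evaluate_sequence.py | merge_consecutive_tokens
-- ===== SOURCE A (Python) =====
-- def merge_consecutive_tokens(tokens, occurrence_indices):
--     """
--     Merges consecutive tokens (based on consecutive indices) into a single token.
--
--     :param tokens: List of token strings.
--     :param occurrence_indices: List of integer indices corresponding to each token.
--     :return: A tuple (merged_tokens, merged_indices)
--     """
--
--     # If there's nothing to merge, return immediately
--     if not tokens or not occurrence_indices:
--         return [], []
--
--     merged_tokens = [tokens[0]]
--     merged_indices = [occurrence_indices[0]]
--
--     for i in range(1, len(tokens)):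
--         current_index = occurrence_indices[i]
--         previous_index = occurrence_indices[i - 1]
--
--         if current_index == previous_index + 1:
--             # If indices are consecutive, merge this token with the last merged token
--             merged_tokens[-1] += tokens[i]
--         else:
--             # Otherwise, start a new token block
--             merged_tokens.append(tokens[i])
--             merged_indices.append(current_index)
--
--     return merged_tokens
-- ===== SOURCE B (Python) =====
-- from itertools import groupby
--
-- def merge_consecutive_tokens(tokens, occurrence_indices):
--     """
--     Merges consecutive tokens (based on consecutive indices) into a single token.
--     Positions i sharing the run key occurrence_indices[i] - i form one maximal
--     block of consecutive indices; groupby splits positions into those blocks.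
--     """
--     if not tokens or not occurrence_indices:
--         return [], []
--     return ["".join(tokens[i] for i in grp)
--             for _, grp in groupby(range(len(tokens)),
--                                   key=lambda i: occurrence_indices[i] - i)]
-- ===== Notes on version B (the rewrite author's own statement) =====
-- stated objective: idiomatic
-- what changed: Replaces A's stateful loop that mutates the last element of an accumulator list with an itertools.groupby over positions keyed by occurrence_indices[i]-i (constant on each run of consecutive indices), joining each group's tokens in a comprehension.
-- outside the precondition, e.g. on merge_consecutive_tokens([], []): A returns [[], []], B returns [[], []]
import Mathlib
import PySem

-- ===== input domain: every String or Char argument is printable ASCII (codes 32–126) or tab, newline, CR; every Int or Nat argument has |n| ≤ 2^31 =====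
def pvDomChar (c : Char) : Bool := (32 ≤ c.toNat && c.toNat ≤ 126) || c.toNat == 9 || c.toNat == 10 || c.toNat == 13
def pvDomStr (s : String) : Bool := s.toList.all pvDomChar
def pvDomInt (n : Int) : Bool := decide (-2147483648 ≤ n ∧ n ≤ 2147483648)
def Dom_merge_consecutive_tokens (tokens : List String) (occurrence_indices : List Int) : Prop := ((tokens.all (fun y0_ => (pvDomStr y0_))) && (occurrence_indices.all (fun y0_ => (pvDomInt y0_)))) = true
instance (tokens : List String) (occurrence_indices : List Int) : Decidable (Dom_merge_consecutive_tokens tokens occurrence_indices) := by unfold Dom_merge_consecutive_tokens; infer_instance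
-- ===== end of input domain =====

-- B replaces A's stateful last-element-mutating loop by an itertools.groupby over
-- positions keyed by occurrence_indices[i]-i; same cost, more idiomatic.


-- ===== PORT A =====
-- merged_tokens[-1] += s  (merged_tokens is always nonempty in A)
def pvAppendLast (s : String) : List String → List String
  | [] => []
  | [x] => [x ++ s]
  | x :: y :: xs => x :: pvAppendLast s (y :: xs)

-- the body of A's for-loop, as a helper
def pvStepA (tokens : List String) (occurrence_indices : List Int)
    (st : List String × List Int) (i : Int) : List String × List Int :=
  let current_index := PySem.List.pyGetD occurrence_indices i 0
  let previous_index := PySem.List.pyGetD occurrence_indices (i - 1) 0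
  if current_index = previous_index + 1 then
    (pvAppendLast (PySem.List.pyGetD tokens i "") st.1, st.2)
  else
    (st.1 ++ [PySem.List.pyGetD tokens i ""], st.2 ++ [current_index])

def merge_consecutive_tokens (tokens : List String) (occurrence_indices : List Int) : List String :=
  -- Python returns the tuple ([], []) here, which is not a List String; Pre_ excludes it
  if tokens = [] ∨ occurrence_indices = [] then []
  else
    let init : List String × List Int :=
      ([PySem.List.pyGetD tokens 0 ""], [PySem.List.pyGetD occurrence_indices 0 0])
    ((PySem.List.pyRange 1 (tokens.length : Int) 1).foldl (pvStepA tokens occurrence_indices) init).1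

-- ===== PORT B =====
-- port of itertools.groupby over a list of positions: the running group keeps the key of
-- its first element, exactly as CPython's groupby does
def pvGroupGo (key : Nat → Int) (k : Int) (cur : List Nat) : List Nat → List (List Nat)
  | [] => [cur]
  | y :: ys => if key y = k then pvGroupGo key k (cur ++ [y]) ys
               else cur :: pvGroupGo key (key y) [y] ys

def pvGroupBy (key : Nat → Int) : List Nat → List (List Nat)
  | [] => []
  | x :: xs => pvGroupGo key (key x) [x] xs

def merge_consecutive_tokens_alt (tokens : List String) (occurrence_indices : List Int) : List String :=
  if tokens = [] ∨ occurrence_indices = [] then []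
  else
    let key := fun (i : Nat) => PySem.List.pyGetD occurrence_indices (i : Int) 0 - i
    (pvGroupBy key (List.range tokens.length)).map
      (fun g => PySem.Str.join "" (g.map (fun (i : Nat) => PySem.List.pyGetD tokens ((i : Nat) : Int) "")))

-- ===== PRECONDITION & SPEC =====
-- Pre_ excludes (a) empty tokens or indices, where A returns the tuple ([], []) — not a
-- value of the declared List-String return type — and (b) occurrence_indices shorter
-- than tokens, where A raises IndexError.
def Pre_merge_consecutive_tokens (tokens : List String) (occurrence_indices : List Int) : Prop :=
  tokens ≠ [] ∧ occurrence_indices ≠ [] ∧ tokens.length ≤ occurrence_indices.length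
instance (tokens : List String) (occurrence_indices : List Int) : Decidable (Pre_merge_consecutive_tokens tokens occurrence_indices) := by unfold Pre_merge_consecutive_tokens; infer_instance

def pvWitness_merge_consecutive_tokens : List String × List Int := (["ab", "c", "d"], [2, 3, 7])

def Spec_merge_consecutive_tokens (tokens : List String) (occurrence_indices : List Int) (out : List String) : Prop := out = merge_consecutive_tokens_alt tokens occurrence_indices
instance (tokens : List String) (occurrence_indices : List Int) (out : List String) : Decidable (Spec_merge_consecutive_tokens tokens occurrence_indices out) := by unfold Spec_merge_consecutive_tokens; infer_instance

-- ===== CLAIM (what is proved, stated in full; the proofs are below) =====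
def Claim_equal_merge_consecutive_tokens : Prop := ∀ (tokens : List String) (occurrence_indices : List Int), Dom_merge_consecutive_tokens tokens occurrence_indices → Pre_merge_consecutive_tokens tokens occurrence_indices → Spec_merge_consecutive_tokens tokens occurrence_indices (merge_consecutive_tokens tokens occurrence_indices)

-- ===== LEMMAS AND PROOFS =====

-- shared characterisation: the blocks produced from position k on (k ≥ 1), m positions
-- to go, with acc the partially merged block under construction
def pvT (tokens : List String) (i : Nat) : String := PySem.List.pyGetD tokens (i : Int) ""
def pvO (occ : List Int) (i : Nat) : Int := PySem.List.pyGetD occ (i : Int) 0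

def pvBlocks (tokens : List String) (occ : List Int) (acc : String) : Nat → Nat → List String
  | _, 0 => [acc]
  | k, m+1 => if pvO occ k = pvO occ (k-1) + 1
              then pvBlocks tokens occ (acc ++ pvT tokens k) (k+1) m
              else acc :: pvBlocks tokens occ (pvT tokens k) (k+1) m

theorem pvBlocks_succ (tokens : List String) (occ : List Int) (acc : String) (k m : Nat) :
    pvBlocks tokens occ acc k (m+1)
      = if pvO occ k = pvO occ (k-1) + 1
        then pvBlocks tokens occ (acc ++ pvT tokens k) (k+1) m
        else acc :: pvBlocks tokens occ (pvT tokens k) (k+1) m := rfl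

theorem pvAppendLast_append (s : String) (done : List String) (acc : String) :
    pvAppendLast s (done ++ [acc]) = done ++ [acc ++ s] := by
  induction done with
  | nil => rfl
  | cons x xs ih =>
      cases xs with
      | nil => rfl
      | cons y ys => simp [pvAppendLast] at ih ⊢; exact ih

theorem pvA_loop (tokens : List String) (occ : List Int) (m : Nat) :
    ∀ (k : Nat), 1 ≤ k → ∀ (done : List String) (acc : String) (idxs : List Int),
    (((List.range' k m).map (Nat.cast : Nat → Int)).foldl (pvStepA tokens occ)
        (done ++ [acc], idxs)).1
      = done ++ pvBlocks tokens occ acc k m := by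
  induction m with
  | zero => intro k hk done acc idxs; simp [pvBlocks]
  | succ m ih =>
      intro k hk done acc idxs
      rw [List.range'_succ]
      simp only [List.map_cons, List.foldl_cons]
      have hc : ((k : Int) - 1) = ((k - 1 : Nat) : Int) := by omega
      by_cases h : pvO occ k = pvO occ (k-1) + 1
      · have h' : PySem.List.pyGetD occ (k : Int) 0 = PySem.List.pyGetD occ ((k-1 : Nat) : Int) 0 + 1 := h
        rw [pvStepA]
        rw [hc, if_pos h']
        dsimp only
        simp only [pvAppendLast_append]
        rw [ih (k+1) (by omega) done (acc ++ PySem.List.pyGetD tokens (k : Int) "") idxs]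
        rw [pvBlocks_succ, if_pos h]
        rfl
      · have h' : ¬ (PySem.List.pyGetD occ (k : Int) 0 = PySem.List.pyGetD occ ((k-1 : Nat) : Int) 0 + 1) := h
        rw [pvStepA]
        rw [hc, if_neg h']
        dsimp only
        rw [ih (k+1) (by omega) (done ++ [acc]) (PySem.List.pyGetD tokens (k : Int) "")
             (idxs ++ [PySem.List.pyGetD occ (k : Int) 0])]
        rw [pvBlocks_succ, if_neg h]
        simp [pvT]

theorem pvIc (l : List (List Char)) : ([] : List Char).intercalate l = l.flatten := by
  induction l with
  | nil => rfl
  | cons a t ih =>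
      cases t with
      | nil => simp [List.intercalate]
      | cons b s => simp [List.intercalate, List.intersperse] at ih ⊢; exact ih

theorem pvJoin_append (xs : List String) (y : String) :
    PySem.Str.join "" (xs ++ [y]) = PySem.Str.join "" xs ++ y := by
  apply String.toList_inj.mp
  simp [PySem.Str.toList_join, String.toList_append, PySem.Chars.join, pvIc]

theorem pvJoin_singleton (y : String) : PySem.Str.join "" [y] = y := by
  apply String.toList_inj.mp
  simp [PySem.Str.toList_join, PySem.Chars.join, pvIc]

theorem pvB_loop (tokens : List String) (occ : List Int) (m : Nat) :
    ∀ (k : Nat), 1 ≤ k → ∀ (cur : List Nat),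
    (pvGroupGo (fun (i : Nat) => PySem.List.pyGetD occ ((i : Nat) : Int) 0 - i)
        (pvO occ (k-1) - ((k-1 : Nat) : Int)) cur (List.range' k m)).map
      (fun g => PySem.Str.join "" (g.map (fun (i : Nat) => PySem.List.pyGetD tokens ((i : Nat) : Int) "")))
      = pvBlocks tokens occ
          (PySem.Str.join "" (cur.map (fun (i : Nat) => PySem.List.pyGetD tokens ((i : Nat) : Int) ""))) k m := by
  induction m with
  | zero => intro k hk cur; simp [pvGroupGo, pvBlocks]
  | succ m ih =>
      intro k hk cur
      rw [List.range'_succ]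
      rw [pvGroupGo]
      have hkk : ((k : Int)) = ((k - 1 : Nat) : Int) + 1 := by omega
      by_cases h : pvO occ k = pvO occ (k-1) + 1
      · have hcond : PySem.List.pyGetD occ (k : Int) 0 - (k : Int)
            = pvO occ (k-1) - ((k-1 : Nat) : Int) := by
          simp only [pvO] at h ⊢; omega
        rw [if_pos hcond]
        have hrw : pvO occ (k-1) - ((k-1 : Nat) : Int)
            = pvO occ ((k+1)-1) - (((k+1)-1 : Nat) : Int) := by
          simp only [Nat.add_sub_cancel, pvO] at h ⊢; omega
        rw [hrw, ih (k+1) (by omega) (cur ++ [k])]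
        simp only [List.map_append, List.map_cons, List.map_nil, pvJoin_append]
        rw [pvBlocks_succ, if_pos h]
        simp [pvT]
      · have hcond : ¬ (PySem.List.pyGetD occ (k : Int) 0 - (k : Int)
            = pvO occ (k-1) - ((k-1 : Nat) : Int)) := by
          simp only [pvO] at h ⊢; omega
        rw [if_neg hcond]
        have hrw : PySem.List.pyGetD occ (k : Int) 0 - (k : Int)
            = pvO occ ((k+1)-1) - (((k+1)-1 : Nat) : Int) := by
          simp only [Nat.add_sub_cancel, pvO]
        rw [List.map_cons, hrw, ih (k+1) (by omega) [k]]
        simp only [List.map_cons, List.map_nil, pvJoin_singleton]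
        rw [pvBlocks_succ, if_neg h]
        simp [pvT]

theorem pvRange_cast (n : Nat) (hn : 1 ≤ n) :
    PySem.List.pyRange 1 (n : Int) 1 = (List.range' 1 (n-1)).map (Nat.cast : Nat → Int) := by
  rw [PySem.List.pyRange_one]
  rw [List.range'_eq_map_range, List.map_map]
  have : ((n : Int) - 1).toNat = n - 1 := by omega
  rw [this]
  apply List.map_congr_left
  intro a _
  simp


-- ===== VERDICT (by name: the statement is the Claim_ definition above) =====
theorem merge_consecutive_tokens_spec : Claim_equal_merge_consecutive_tokens := by
  intro tokens occ _hdom hpre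
  obtain ⟨ht, ho, _hlen⟩ := hpre
  unfold Spec_merge_consecutive_tokens merge_consecutive_tokens merge_consecutive_tokens_alt
  rw [if_neg (by simp [ht, ho]), if_neg (by simp [ht, ho])]
  dsimp only
  have hn : 1 ≤ tokens.length := by
    cases tokens with
    | nil => exact absurd rfl ht
    | cons a l => simp
  obtain ⟨m, hm⟩ : ∃ m, tokens.length = m + 1 := ⟨tokens.length - 1, by omega⟩
  -- A side
  rw [pvRange_cast tokens.length hn]
  have hA := pvA_loop tokens occ (tokens.length - 1) 1 (le_refl 1)
      [] (PySem.List.pyGetD tokens 0 "") [PySem.List.pyGetD occ 0 0]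
  simp only [List.nil_append] at hA
  rw [hA]
  -- B side
  rw [hm, List.range_eq_range', List.range'_succ]
  simp only [pvGroupBy]
  have hkey0 : PySem.List.pyGetD occ ((0 : Nat) : Int) 0 - ((0 : Nat) : Int)
      = pvO occ (1-1) - ((1-1 : Nat) : Int) := by simp [pvO]
  rw [hkey0]
  rw [pvB_loop tokens occ m 1 (le_refl 1) [0]]
  simp only [List.map_cons, List.map_nil, pvJoin_singleton, Nat.add_sub_cancel, Nat.cast_zero]
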